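-- pv_equiv track=rewrite | github.com/ehxu/MGSIR-SQLi | src/features/mgsir/hdcan.py | _scan_semantics
-- ===== SOURCE A (Python) =====
-- SQL_KEYWORDS = (
--     "select",
--     "union",
--     "from",
--     "where",
--     "insert",
--     "update",
--     "delete",
--     "drop",
--     "create",
--     "table",
--     "values",
--     "into",
--     "set",
--     "join",
--     "having",
--     "order",
--     "group",
--     "limit",
--     "and",
--     "or",
-- )
--
-- DANGEROUS_FUNCS = ("sleep", "benchmark", "load_file", "extractvalue", "updatexml")
--
-- def _fsm_match(word, s):
--     wlen = len(word)
--     i = 0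
--     for idx, ch in enumerate(s):
--         c = ch.lower()
--         if c == word[i]:
--             i += 1
--             if i == wlen:
--                 return idx
--         elif c.isalnum():
--             i = 0
--     return None
--
-- def _scan_semantics(s: str):
--     kw_pos = {}
--     fn_hit = set()
--
--     # 每个 keyword 只跑一次 FSM
--     for kw in SQL_KEYWORDS:
--         pos = _fsm_match(kw, s)
--         if pos is not None:
--             kw_pos[kw] = pos
--
--     for fn in DANGEROUS_FUNCS:
--         pos = _fsm_match(fn, s)
--         if pos is not None:
--             tail = s[pos + len(fn) : pos + len(fn) + 4]
--             if "(" in tail: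
--                 fn_hit.add(fn)
--
--     return kw_pos, fn_hit
-- ===== SOURCE B (Python) =====
-- SQL_KEYWORDS = (
--     "select", "union", "from", "where", "insert", "update", "delete", "drop",
--     "create", "table", "values", "into", "set", "join", "having", "order",
--     "group", "limit", "and", "or",
-- )
--
-- DANGEROUS_FUNCS = ("sleep", "benchmark", "load_file", "extractvalue", "updatexml")
--
-- def _scan_semantics(s: str):
--     words = SQL_KEYWORDS + DANGEROUS_FUNCS
--     prog = {w: 0 for w in words}      # progress index per word
--     done = {}                         # word -> first completion position
--     for idx, ch in enumerate(s):
--         c = ch.lower()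
--         for w in words:
--             if w in done:
--                 continue
--             i = prog[w]
--             if c == w[i]:
--                 i += 1
--                 if i == len(w):
--                     done[w] = idx
--                     i = 0
--                 prog[w] = i
--             elif c.isalnum():
--                 prog[w] = 0
--     kw_pos = {kw: done[kw] for kw in SQL_KEYWORDS if kw in done}
--     fn_hit = set()
--     for fn in DANGEROUS_FUNCS:
--         if fn in done:
--             pos = done[fn]
--             if "(" in s[pos + len(fn): pos + len(fn) + 4]:
--                 fn_hit.add(fn)
--     return kw_pos, fn_hit
-- ===== Notes on version B (the rewrite author's own statement) =====
-- stated objective: alternative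
-- what changed: Instead of running a separate FSM pass over the whole string for each of the 25 words, B makes ONE left-to-right pass over s, lowercasing each char once and advancing an independent progress counter per word, recording each word's first completion position; the outputs are then assembled from that table.
import Mathlib
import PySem

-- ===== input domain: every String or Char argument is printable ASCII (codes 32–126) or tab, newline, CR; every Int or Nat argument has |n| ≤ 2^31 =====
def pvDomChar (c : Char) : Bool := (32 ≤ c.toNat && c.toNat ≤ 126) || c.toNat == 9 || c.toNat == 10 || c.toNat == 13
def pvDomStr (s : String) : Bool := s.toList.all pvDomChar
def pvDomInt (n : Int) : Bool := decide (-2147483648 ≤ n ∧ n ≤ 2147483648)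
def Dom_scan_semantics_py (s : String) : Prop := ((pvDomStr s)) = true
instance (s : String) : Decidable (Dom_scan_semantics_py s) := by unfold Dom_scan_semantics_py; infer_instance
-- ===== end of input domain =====

-- B replaces A's 25 independent full-string FSM passes (one per word) by a single
-- left-to-right pass that advances all 25 word FSMs simultaneously; same results.

-- ===== PORT A =====
def pvSqlKeywords : List String :=
  ["select", "union", "from", "where", "insert", "update", "delete", "drop",
   "create", "table", "values", "into", "set", "join", "having", "order",
   "group", "limit", "and", "or"]

def pvDangerousFuncs : List String :=
  ["sleep", "benchmark", "load_file", "extractvalue", "updatexml"]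

-- the shared tail test  '"(" in s[pos+len(fn) : pos+len(fn)+4]'  (identical code in A and B)
def pvHasParenAfter (s : List Char) (pos : Int) (wlen : Nat) : Bool :=
  PySem.Chars.isIn ['('] (PySem.List.slice s (some (pos + (wlen : Int))) (some (pos + (wlen : Int) + 4)))

-- _fsm_match: i = progress, idx = current enumerate index
def pvFsmGo (word : List Char) (i : Nat) (idx : Nat) : List Char → Option Int
  | [] => none
  | ch :: rest =>
    let c := PySem.Chars.lowerChar ch
    if word[i]? == some c then
      if i + 1 == word.length then some (idx : Int)
      else pvFsmGo word (i + 1) (idx + 1) rest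
    else if PySem.Chars.isalnum c then pvFsmGo word 0 (idx + 1) rest
    else pvFsmGo word i (idx + 1) rest

def scan_semantics_py (s : String) : (List (String × Int)) × List String :=
  let kw_pos : PySem.Dict String Int :=
    pvSqlKeywords.foldl (fun d kw =>
      match pvFsmGo kw.toList 0 0 s.toList with
      | some pos => d.insert kw pos
      | none => d) PySem.Dict.empty
  let fn_hit : PySem.Set String :=
    pvDangerousFuncs.foldl (fun st fn =>
      match pvFsmGo fn.toList 0 0 s.toList with
      | some pos => if pvHasParenAfter s.toList pos fn.toList.length then PySem.Set.add st fn else st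
      | none => st) PySem.Set.empty
  (kw_pos.items, fn_hit)

-- ===== PORT B =====
-- one FSM step of a single word: state = (progress, first completion position)
def pvStep (w : List Char) (idx : Nat) (c : Char) : Nat × Option Nat → Nat × Option Nat
  | (i, some d) => (i, some d)
  | (i, none) =>
    if w[i]? == some c then
      if i + 1 == w.length then (0, some idx) else (i + 1, none)
    else if PySem.Chars.isalnum c then (0, none)
    else (i, none)

-- the single pass: advance every word's state on each character
def pvScanAll (idx : Nat) (sts : List (String × (Nat × Option Nat))) : List Char → List (String × (Nat × Option Nat))
  | [] => sts
  | ch :: rest =>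
    let c := PySem.Chars.lowerChar ch
    pvScanAll (idx + 1) (sts.map (fun p => (p.1, pvStep p.1.toList idx c p.2))) rest

def pvDoneOf (final : List (String × (Nat × Option Nat))) (w : String) : Option Nat :=
  match final.find? (fun p => p.1 == w) with
  | some (_, (_, some d)) => some d
  | _ => none

def scan_semantics_py_alt (s : String) : (List (String × Int)) × List String :=
  let words := pvSqlKeywords ++ pvDangerousFuncs
  let final := pvScanAll 0 (words.map (fun w => (w, (0, (none : Option Nat))))) s.toList
  let kw_pos := pvSqlKeywords.filterMap (fun kw => (pvDoneOf final kw).map (fun d => (kw, (d : Int))))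
  let fn_hit : PySem.Set String :=
    pvDangerousFuncs.foldl (fun st fn =>
      match pvDoneOf final fn with
      | some p => if pvHasParenAfter s.toList (p : Int) fn.toList.length then PySem.Set.add st fn else st
      | none => st) PySem.Set.empty
  (kw_pos, fn_hit)

-- ===== PRECONDITION & SPEC =====
def Spec_scan_semantics_py (s : String) (out : (List (String × Int)) × List String) : Prop := out = scan_semantics_py_alt s
instance (s : String) (out : (List (String × Int)) × List String) : Decidable (Spec_scan_semantics_py s out) := by unfold Spec_scan_semantics_py; infer_instance

-- ===== CLAIM (what is proved, stated in full; the proofs are below) =====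
def Claim_equal_scan_semantics_py : Prop := ∀ (s : String), Dom_scan_semantics_py s → Spec_scan_semantics_py s (scan_semantics_py s)

-- ===== LEMMAS AND PROOFS =====

-- per-word view of the single pass
def pvWordRun (w : List Char) (idx : Nat) (st : Nat × Option Nat) : List Char → Nat × Option Nat
  | [] => st
  | ch :: rest => pvWordRun w (idx + 1) (pvStep w idx (PySem.Chars.lowerChar ch) st) rest

theorem pvScanAll_eq_map : ∀ (l : List Char) (idx : Nat) (sts : List (String × (Nat × Option Nat))),
    pvScanAll idx sts l = sts.map (fun p => (p.1, pvWordRun p.1.toList idx p.2 l)) := by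
  intro l
  induction l with
  | nil => intro idx sts; simp [pvScanAll, pvWordRun]
  | cons ch rest ih =>
    intro idx sts
    simp only [pvScanAll, pvWordRun, ih, List.map_map]
    rfl

theorem pvWordRun_frozen (w : List Char) : ∀ (l : List Char) (idx i d : Nat),
    pvWordRun w idx (i, some d) l = (i, some d) := by
  intro l
  induction l with
  | nil => intro idx i d; rfl
  | cons ch rest ih => intro idx i d; simp [pvWordRun, pvStep, ih]

theorem pvWordRun_fsm (w : List Char) : ∀ (l : List Char) (idx i : Nat),
    ((pvWordRun w idx (i, none) l).2).map (fun d => (d : Int)) = pvFsmGo w i idx l := by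
  intro l
  induction l with
  | nil => intro idx i; rfl
  | cons ch rest ih =>
    intro idx i
    simp only [pvWordRun, pvStep, pvFsmGo]
    by_cases h1 : w[i]? == some (PySem.Chars.lowerChar ch)
    · simp only [h1, if_true]
      by_cases h2 : i + 1 == w.length
      · simp [h2, pvWordRun_frozen]
      · simp only [h2, Bool.false_eq_true, if_false]
        simpa using ih (idx + 1) (i + 1)
    · simp only [h1, if_false, Bool.false_eq_true]
      by_cases h3 : PySem.Chars.isalnum (PySem.Chars.lowerChar ch)
      · simp only [h3, if_true]
        simpa using ih (idx + 1) 0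
      · simp only [h3, Bool.false_eq_true, if_false]
        simpa using ih (idx + 1) i

theorem pvFind?_map_key {α : Type} (f : String → α) :
    ∀ (ws : List String), ws.Nodup → ∀ kw ∈ ws,
      (ws.map (fun w => (w, f w))).find? (fun p => p.1 == kw) = some (kw, f kw) := by
  intro ws
  induction ws with
  | nil => intro _ kw hkw; cases hkw
  | cons w rest ih =>
    intro hnd kw hkw
    rcases List.mem_cons.mp hkw with h | h
    · subst h; simp
    · have hne : w ≠ kw := by
        intro he; exact (List.nodup_cons.mp hnd).1 (he ▸ h)
      simp only [List.map_cons, List.find?]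
      have : (w == kw) = false := by simp [hne]
      simp only [this]
      exact ih (List.nodup_cons.mp hnd).2 kw h

-- the function B looks up, per word
theorem pvDoneOf_eq (s : String) (kw : String)
    (hmem : kw ∈ pvSqlKeywords ++ pvDangerousFuncs) :
    (pvDoneOf (pvScanAll 0 (((pvSqlKeywords ++ pvDangerousFuncs)).map
        (fun w => (w, (0, (none : Option Nat))))) s.toList) kw).map (fun d => (d : Int))
      = pvFsmGo kw.toList 0 0 s.toList := by
  have hnd : (pvSqlKeywords ++ pvDangerousFuncs).Nodup := by decide
  rw [pvScanAll_eq_map]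
  simp only [List.map_map]
  have hfind := pvFind?_map_key (fun w => pvWordRun w.toList 0 (0, none) s.toList)
      (pvSqlKeywords ++ pvDangerousFuncs) hnd kw hmem
  unfold pvDoneOf
  have hcomp : ((pvSqlKeywords ++ pvDangerousFuncs).map
        ((fun p => (p.1, pvWordRun p.1.toList 0 p.2 s.toList)) ∘ fun w => (w, (0, (none : Option Nat)))))
      = (pvSqlKeywords ++ pvDangerousFuncs).map (fun w => (w, pvWordRun w.toList 0 (0, none) s.toList)) := rfl
  rw [hcomp, hfind]
  have h2 := pvWordRun_fsm kw.toList s.toList 0 0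
  rcases hr : pvWordRun kw.toList 0 (0, none) s.toList with ⟨i, od⟩
  rw [hr] at h2
  cases od <;> simp_all

-- filter/map form of a filterMap over an Option-valued function
theorem pvFilterMap_eq (F : String → Option Int) :
    ∀ (ws : List String),
      (ws.filter (fun kw => (F kw).isSome)).map (fun kw => (kw, (F kw).getD 0))
        = ws.filterMap (fun kw => (F kw).map (fun v => (kw, v))) := by
  intro ws
  induction ws with
  | nil => rfl
  | cons w rest ih =>
    cases h : F w <;> simp [List.filter, List.filterMap, h, ih]

-- A's dict-building loop, as items
theorem pvDictFold_eq (F : String → Option Int) (ws : List String) (hnd : ws.Nodup) :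
    (ws.foldl (fun d kw =>
        match F kw with
        | some pos => d.insert kw pos
        | none => d) (PySem.Dict.empty : PySem.Dict String Int)).items
      = ws.filterMap (fun kw => (F kw).map (fun v => (kw, v))) := by
  have hfun : (fun (d : PySem.Dict String Int) kw =>
      match F kw with
      | some pos => d.insert kw pos
      | none => d)
    = (fun d kw => if (F kw).isSome then d.insert kw ((F kw).getD 0) else d) := by
    funext d kw; cases F kw <;> rfl
  rw [hfun, PySem.List.foldl_if_eq_foldl_filter, ← pvFilterMap_eq F ws]
  have h3 := PySem.Dict.items_foldl_insert_fresh
      (l := ws.filter (fun kw => (F kw).isSome)) (k := fun kw => kw)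
      (v := fun kw => (F kw).getD 0) (d := (PySem.Dict.empty : PySem.Dict String Int))
      (by intro a _; simp [PySem.Dict.contains_empty]) (by simpa using hnd.filter _)
  simpa [PySem.Dict.items, PySem.Dict.empty] using h3

-- ===== VERDICT (by name: the statement is the Claim_ definition above) =====
theorem scan_semantics_py_spec : Claim_equal_scan_semantics_py := by
  intro s _
  unfold Spec_scan_semantics_py scan_semantics_py scan_semantics_py_alt
  set F : String → Option Int := fun kw => pvFsmGo kw.toList 0 0 s.toList with hF
  have hdone : ∀ kw ∈ pvSqlKeywords ++ pvDangerousFuncs,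
      (pvDoneOf (pvScanAll 0 (((pvSqlKeywords ++ pvDangerousFuncs)).map
          (fun w => (w, (0, (none : Option Nat))))) s.toList) kw).map (fun d => (d : Int)) = F kw :=
    fun kw hkw => pvDoneOf_eq s kw hkw
  dsimp only
  refine Prod.ext ?_ ?_
  · -- kw_pos
    dsimp only
    rw [pvDictFold_eq F pvSqlKeywords (by decide)]
    refine List.filterMap_congr fun kw hkw => ?_
    have h := hdone kw (List.mem_append_left _ hkw)
    rcases hd : pvDoneOf (pvScanAll 0 (((pvSqlKeywords ++ pvDangerousFuncs)).map
        (fun w => (w, (0, (none : Option Nat))))) s.toList) kw with _ | p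
    · rw [hd] at h; simp at h; rw [← h]; simp
    · rw [hd] at h; simp at h; rw [← h]; simp
  · -- fn_hit
    dsimp only
    apply PySem.List.foldl_congr_mem
    intro st fn hfn
    have h := hdone fn (List.mem_append_right _ hfn)
    rcases hd : pvDoneOf (pvScanAll 0 (((pvSqlKeywords ++ pvDangerousFuncs)).map
        (fun w => (w, (0, (none : Option Nat))))) s.toList) fn with _ | p
    · rw [hd] at h; simp only [hF] at h; simp at h; rw [← h]
    · rw [hd] at h; simp only [hF] at h; simp at h; rw [← h]
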